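-- pv_equiv track=rewrite | github.com/alexandraback/datacollection | solutions_5753053697277952_0/Python/benfei/a.py | evacuate
-- ===== SOURCE A (Python) =====
-- from string import ascii_uppercase
--
-- def evacuate(senators):
--     parties = dict()
--     remaining_senators = sum(senators)
--     plan = []
--     for party_num, party_letter in enumerate(ascii_uppercase[:len(senators)]):
--         parties[party_letter] = senators[party_num]
--
--     while remaining_senators > 2:
--         party = max(parties, key=parties.get)
--         step = party
--         parties[party] -= 1
--         remaining_senators -= 1
--         if remaining_senators > 2:
--             party, party_senators = max(parties.items(), key=lambda x: x[1])
--             if 2 * party_senators > remaining_senators: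
--                 step += party
--                 parties[party] -= 1
--                 remaining_senators -= 1
--         plan.append(step)
--
--     # handle when remaining senators <= 2
--     remaining_parties = []
--     for party_letter, party_senators in parties.items():
--         remaining_parties += [party_letter] * party_senators
--     plan.append("".join(remaining_parties))
--
--     return plan
-- ===== SOURCE B (Python) =====
-- from bisect import insort
--
-- def evacuate(senators):
--     # Sorted-list priority queue of (-count, party_index), smallest first =
--     # largest party first, alphabetical on ties.  There are only 26 party letters.
--     n = min(len(senators), 26)
--     order = []
--     for i in range(n):
--         insort(order, (-senators[i], i))
--     remaining = sum(senators)
--     plan = []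
--     while remaining > 2:
--         negc, i = order.pop(0)
--         insort(order, (negc + 1, i))
--         remaining -= 1
--         step = chr(65 + i)
--         if remaining > 2:
--             negc, j = order[0]
--             if -2 * negc > remaining:
--                 order.pop(0)
--                 insort(order, (negc + 1, j))
--                 remaining -= 1
--                 step += chr(65 + j)
--         plan.append(step)
--     tail = []
--     for negc, i in sorted(order, key=lambda t: t[1]):
--         tail.append(chr(65 + i) * (-negc))
--     plan.append("".join(tail))
--     return plan
-- ===== Notes on version B (the rewrite author's own statement) =====
-- stated objective: alternative
-- what changed: A rescans the whole dict twice per loop iteration with max(..., key=...); B instead keeps the parties in a sorted list of (-count, party_index) pairs maintained by bisect.insort, so each pick is the list head and each update a single insort, and the final string is built from the list sorted back by party index.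
import Mathlib
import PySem

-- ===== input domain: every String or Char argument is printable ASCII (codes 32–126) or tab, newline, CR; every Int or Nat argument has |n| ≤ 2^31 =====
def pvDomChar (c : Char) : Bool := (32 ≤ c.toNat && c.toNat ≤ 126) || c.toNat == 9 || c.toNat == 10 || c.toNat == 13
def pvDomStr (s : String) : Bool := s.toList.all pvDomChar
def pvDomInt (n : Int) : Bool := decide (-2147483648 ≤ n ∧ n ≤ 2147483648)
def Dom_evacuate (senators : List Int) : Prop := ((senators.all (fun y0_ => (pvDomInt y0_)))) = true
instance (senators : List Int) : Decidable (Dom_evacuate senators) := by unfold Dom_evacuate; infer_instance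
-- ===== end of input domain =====

-- B replaces A's two per-iteration max scans over the dict by a sorted-list priority
-- queue of (-count, party_index) pairs maintained by bisect.insort; same return value.

-- ===== PORT A =====
-- from string import ascii_uppercase
def asciiUppercase : List Char :=
  ['A','B','C','D','E','F','G','H','I','J','K','L','M',
   'N','O','P','Q','R','S','T','U','V','W','X','Y','Z']

-- the 'while remaining_senators > 2' loop; returns the final dict and plan (Python mutates both)
def evacLoopA (parties : PySem.Dict Char Int) (remaining : Int) (plan : List String) :
    PySem.Dict Char Int × List String :=
  if h : remaining > 2 then
    -- party = max(parties, key=parties.get); every key is present, so .get = .getD _ 0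
    match PySem.List.max? parties.keys (fun k => parties.getD k 0) with
    | none => (parties, plan)   -- max() of an empty dict raises; unreachable from evacuate's calls
    | some party =>
      let parties1 := parties.modify party 0 (· - 1)   -- parties[party] -= 1 (key present)
      if h2 : remaining - 1 > 2 then
        match PySem.List.max? parties1.items (fun x => x.2) with
        | none => (parties1, plan)   -- unreachable: the dict is nonempty here
        | some pc =>
          if 2 * pc.2 > remaining - 1 then
            evacLoopA (parties1.modify pc.1 0 (· - 1)) (remaining - 2)
              (plan ++ [String.ofList [party, pc.1]])
          else
            evacLoopA parties1 (remaining - 1) (plan ++ [String.ofList [party]])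
      else
        evacLoopA parties1 (remaining - 1) (plan ++ [String.ofList [party]])
  else (parties, plan)
termination_by remaining.toNat
decreasing_by all_goals omega

def evacuate (senators : List Int) : List String :=
  let remaining := senators.sum
  -- for party_num, party_letter in enumerate(ascii_uppercase[:len(senators)]): parties[letter] = senators[num]
  let letters := PySem.List.slice asciiUppercase none (some (senators.length : Int))
  let parties := (PySem.List.enumerate letters 0).foldl
    (fun d p => d.insert p.2 (PySem.List.pyGetD senators p.1 0)) PySem.Dict.empty
  let res := evacLoopA parties remaining []
  -- remaining_parties += [party_letter] * party_senators   (a list of 1-char strings)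
  let remainingParties := res.1.items.foldl
    (fun acc p => acc ++ PySem.List.pyRepeat [String.ofList [p.1]] p.2) ([] : List String)
  res.2 ++ [PySem.Str.join "" remainingParties]

-- ===== PORT B =====
-- Python compares the tuples (-count, index) lexicographically; Lean's '<' on pairs is
-- the pointwise order, so the comparison is spelled out.
def pairLt (a b : Int × Int) : Bool := a.1 < b.1 || (a.1 == b.1 && a.2 < b.2)

-- bisect.insort into a sorted list: insert before the first strictly greater entry
def insortP (x : Int × Int) : List (Int × Int) → List (Int × Int)
  | [] => [x]
  | y :: ys => if pairLt x y then x :: y :: ys else y :: insortP x ys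

def chr65 (i : Int) : Char := Char.ofNat (65 + i).toNat   -- chr(65 + i); here 0 ≤ i < 26

def evacLoopB (order : List (Int × Int)) (remaining : Int) (plan : List String) :
    List (Int × Int) × List String :=
  if h : remaining > 2 then
    match order with
    | [] => (order, plan)   -- order.pop(0) raises; unreachable from evacuate_alt's calls
    | (negc, i) :: rest =>
      let order1 := insortP (negc + 1, i) rest
      if h2 : remaining - 1 > 2 then
        match order1 with
        | [] => (order1, plan)   -- unreachable: order1 is nonempty
        | (negc2, j) :: rest2 =>
          if -2 * negc2 > remaining - 1 then
            evacLoopB (insortP (negc2 + 1, j) rest2) (remaining - 2)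
              (plan ++ [String.ofList [chr65 i, chr65 j]])
          else evacLoopB order1 (remaining - 1) (plan ++ [String.ofList [chr65 i]])
      else evacLoopB order1 (remaining - 1) (plan ++ [String.ofList [chr65 i]])
  else (order, plan)
termination_by remaining.toNat
decreasing_by all_goals omega

def evacuate_alt (senators : List Int) : List String :=
  let n : Int := min (senators.length : Int) 26
  let order := (PySem.List.pyRange 0 n 1).foldl
    (fun h i => insortP (-(PySem.List.pyGetD senators i 0), i) h) []
  let res := evacLoopB order senators.sum []
  let tail := (PySem.List.sorted res.1 (fun t => t.2)).foldl
    (fun acc p => acc ++ [String.ofList (PySem.List.pyRepeat [chr65 p.2] (-p.1))]) ([] : List String)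
  res.2 ++ [PySem.Str.join "" tail]

-- ===== PRECONDITION & SPEC =====
def Spec_evacuate (senators : List Int) (out : List String) : Prop := out = evacuate_alt senators
instance (senators : List Int) (out : List String) : Decidable (Spec_evacuate senators out) := by unfold Spec_evacuate; infer_instance

-- ===== CLAIM (what is proved, stated in full; the proofs are below) =====
def Claim_equal_evacuate : Prop := ∀ (senators : List Int), Dom_evacuate senators → Spec_evacuate senators (evacuate senators)

-- ===== LEMMAS AND PROOFS =====

-- j-th party letter
def letterN (j : Nat) : Char := Char.ofNat (65 + j)

-- canonical contents of A's dict for live counts c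
def itemsOf (c : List Int) : List (Char × Int) :=
  (List.range c.length).map (fun j => (letterN j, c.getD j 0))

-- canonical (unsorted) contents of B's priority list for live counts c
def pairsOf (c : List Int) : List (Int × Int) :=
  (List.range c.length).map (fun j => (-(c.getD j 0), (j : Int)))

def PL (a b : Int × Int) : Prop := pairLt a b = true

lemma chr65_natCast (j : Nat) : chr65 (j : Int) = letterN j := by
  have h : ((65 : Int) + (j : Int)).toNat = 65 + j := by omega
  simp [chr65, letterN, h]

lemma exists_first_max (c : List Int) (hne : c ≠ []) :
    ∃ i, i < c.length ∧ (∀ j, j < c.length → c.getD j 0 ≤ c.getD i 0) ∧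
      (∀ j, j < i → c.getD j 0 < c.getD i 0) := by
  induction c with
  | nil => exact absurd rfl hne
  | cons x t ih =>
    rcases eq_or_ne t [] with rfl | hte
    · refine ⟨0, by simp, ?_, by omega⟩
      intro j hj
      have hj0 : j = 0 := by simp at hj; omega
      subst hj0; simp
    · obtain ⟨i, hi, hmax, hfirst⟩ := ih hte
      by_cases hx : x < t.getD i 0
      · refine ⟨i + 1, by simpa using hi, ?_, ?_⟩
        · intro j hj
          cases j with
          | zero => simpa using hx.le
          | succ j => simpa using hmax j (by simpa using hj)
        · intro j hj
          cases j with
          | zero => simpa using hx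
          | succ j => simpa using hfirst j (by omega)
      · refine ⟨0, by simp, ?_, by omega⟩
        intro j hj
        cases j with
        | zero => simp
        | succ j =>
          simpa using le_trans (hmax j (by simpa using hj)) (by omega)

def bestAcc {α : Type} (key : α → Int) (m : α) (t : List α) : α :=
  t.foldl (fun m y => if key m < key y then y else m) m

lemma max?_cons {α : Type} (key : α → Int) (x : α) (t : List α) :
    PySem.List.max? (x :: t) key = some (bestAcc key x t) := by
  suffices h : ∀ (t : List α) (m : α),
      t.foldl (fun acc y => match acc with
        | none => some y
        | some m => if key m < key y then some y else some m) (some m) = some (bestAcc key m t) by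
    simpa [PySem.List.max?] using h t x
  intro t
  induction t with
  | nil => intro m; simp [bestAcc]
  | cons y ys ih =>
    intro m
    by_cases h : key m < key y <;> simp [bestAcc, h, ih]

lemma bestAcc_all_le {α : Type} (key : α → Int) (m : α) (t : List α)
    (h : ∀ y ∈ t, key y ≤ key m) : bestAcc key m t = m := by
  induction t with
  | nil => rfl
  | cons y ys ih =>
    have hy : ¬ key m < key y := not_lt.mpr (h y (by simp))
    simp only [bestAcc, List.foldl_cons, if_neg hy]
    exact ih (fun z hz => h z (by simp [hz]))

lemma bestAcc_first {α : Type} (key : α → Int) :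
    ∀ (t : List α) (i : Nat) (m : α) (hi : i < t.length),
      key m < key (t[i]'hi) →
      (∀ j (hj : j < t.length), key (t[j]'hj) ≤ key (t[i]'hi)) →
      (∀ j (hj : j < i), key (t[j]'(hj.trans hi)) < key (t[i]'hi)) →
      bestAcc key m t = t[i]'hi := by
  intro t
  induction t with
  | nil => intro i m hi; simp at hi
  | cons y ys ih =>
    intro i m hi hm hmax hfirst
    cases i with
    | zero =>
      simp only [List.getElem_cons_zero] at hm hmax ⊢
      simp only [bestAcc, List.foldl_cons, if_pos hm]
      exact bestAcc_all_le key y ys (by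
        intro z hz
        obtain ⟨j, hj, rfl⟩ := List.mem_iff_getElem.mp hz
        simpa using hmax (j + 1) (by simpa using Nat.succ_lt_succ hj))
    | succ i =>
      have hyi : key y < key (ys[i]'(by simpa using hi)) := by
        simpa using hfirst 0 (Nat.succ_pos i)
      simp only [bestAcc, List.foldl_cons]
      have : ∀ m', key m' < key (ys[i]'(by simpa using hi)) →
          ys.foldl (fun m y => if key m < key y then y else m) m' = ys[i]'(by simpa using hi) := by
        intro m' hm'
        exact ih i m' (by simpa using hi) hm'
          (fun j hj => by simpa using hmax (j + 1) (by simpa using Nat.succ_lt_succ hj))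
          (fun j hj => by simpa using hfirst (j + 1) (by simpa using Nat.succ_lt_succ hj))
      by_cases h : key m < key y
      · simpa [h] using this y hyi
      · simpa [h] using this m (by simpa using hm)

lemma max?_eq_first {α : Type} (key : α → Int) (xs : List α) (i : Nat) (hi : i < xs.length)
    (hmax : ∀ j (hj : j < xs.length), key (xs[j]'hj) ≤ key (xs[i]'hi))
    (hfirst : ∀ j (hj : j < i), key (xs[j]'(hj.trans hi)) < key (xs[i]'hi)) :
    PySem.List.max? xs key = some (xs[i]'hi) := by
  cases xs with
  | nil => simp at hi
  | cons x t =>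
    rw [max?_cons]
    cases i with
    | zero =>
      simp only [List.getElem_cons_zero] at hmax ⊢
      congr 1
      exact bestAcc_all_le key x t (by
        intro z hz
        obtain ⟨j, hj, rfl⟩ := List.mem_iff_getElem.mp hz
        simpa using hmax (j + 1) (by simpa using Nat.succ_lt_succ hj))
    | succ i =>
      congr 1
      exact bestAcc_first key t i x (by simpa using hi)
        (by simpa using hfirst 0 (Nat.succ_pos i))
        (fun j hj => by simpa using hmax (j + 1) (by simpa using Nat.succ_lt_succ hj))
        (fun j hj => by simpa using hfirst (j + 1) (by simpa using Nat.succ_lt_succ hj))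

lemma PL_trans {a b c : Int × Int} (h1 : PL a b) (h2 : PL b c) : PL a c := by
  simp [PL, pairLt] at *
  omega

lemma PL_total {a b : Int × Int} (h : a.2 ≠ b.2) : PL a b ∨ PL b a := by
  simp [PL, pairLt]
  omega

lemma insortP_perm (x : Int × Int) (l : List (Int × Int)) :
    (insortP x l).Perm (x :: l) := by
  induction l with
  | nil => simp [insortP]
  | cons y ys ih =>
    by_cases h : pairLt x y
    · simp [insortP, h]
    · simp only [insortP, h, if_false]
      exact (ih.cons y).trans (List.Perm.swap x y ys)

lemma insortP_pairwise (x : Int × Int) (l : List (Int × Int))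
    (hs : l.Pairwise PL) (hd : ∀ y ∈ l, y.2 ≠ x.2) :
    (insortP x l).Pairwise PL := by
  induction l with
  | nil => simp [insortP, PL]
  | cons y ys ih =>
    rw [List.pairwise_cons] at hs
    by_cases h : pairLt x y
    · simp only [insortP, h, if_true]
      refine List.Pairwise.cons ?_ (List.Pairwise.cons hs.1 hs.2)
      intro z hz
      rcases List.mem_cons.mp hz with rfl | hz'
      · exact h
      · exact PL_trans h (hs.1 z hz')
    · simp only [insortP, h, if_false]
      have hyx : PL y x := by
        rcases PL_total (a := x) (b := y) (Ne.symm (hd y (by simp))) with hxy | hyx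
        · exact absurd hxy h
        · exact hyx
      refine List.Pairwise.cons ?_ (ih hs.2 (fun z hz => hd z (by simp [hz])))
      intro z hz
      rcases List.mem_cons.mp ((insortP_perm x ys).mem_iff.mp hz) with rfl | hz'
      · exact hyx
      · exact hs.1 z hz'

lemma length_pairsOf (c : List Int) : (pairsOf c).length = c.length := by
  simp [pairsOf]

lemma mem_pairsOf {c : List Int} {y : Int × Int} (h : y ∈ pairsOf c) :
    ∃ j, j < c.length ∧ y = (-(c.getD j 0), (j : Int)) := by
  simp only [pairsOf, List.mem_map, List.mem_range] at h
  obtain ⟨j, hj, rfl⟩ := h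
  exact ⟨j, hj, rfl⟩

lemma self_mem_pairsOf {c : List Int} {j : Nat} (hj : j < c.length) :
    (-(c.getD j 0), (j : Int)) ∈ pairsOf c := by
  simp only [pairsOf, List.mem_map, List.mem_range]
  exact ⟨j, hj, rfl⟩

lemma getElem_pairsOf (c : List Int) (j : Nat) (hj : j < c.length) :
    (pairsOf c)[j]'(by simpa [pairsOf] using hj) = (-(c.getD j 0), (j : Int)) := by
  simp [pairsOf]

lemma nodup_pairsOf (c : List Int) : (pairsOf c).Nodup := by
  refine List.Nodup.map_on ?_ List.nodup_range
  intro i hi j hj h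
  have := congrArg Prod.snd h
  simpa using this

lemma pairsOf_set (c : List Int) (i : Nat) (v : Int) (hi : i < c.length) :
    pairsOf (c.set i v) = (pairsOf c).set i (-v, (i : Int)) := by
  apply List.ext_getElem
  · simp [pairsOf]
  · intro j hj hj'
    simp only [pairsOf, List.length_set] at *
    rw [List.getElem_set]
    simp only [List.getElem_map, List.getElem_range]
    by_cases hji : j = i
    · subst hji
      simp [List.getD, List.getElem?_set_self', hi]
    · simp [Ne.symm hji, List.getD, List.getElem?_set_ne (fun h => hji h.symm)]

lemma pairwise_snd_lt_pairsOf (c : List Int) :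
    (pairsOf c).Pairwise (fun a b => a.2 < b.2) := by
  refine List.Pairwise.map _ ?_ List.pairwise_lt_range
  intro a b h
  simpa using h

lemma sorted_perm_head {order : List (Int × Int)} {c : List Int}
    (hs : order.Pairwise PL) (hp : order.Perm (pairsOf c))
    {i0 : Nat} (hi0 : i0 < c.length)
    (hmax : ∀ j, j < c.length → c.getD j 0 ≤ c.getD i0 0)
    (hfirst : ∀ j, j < i0 → c.getD j 0 < c.getD i0 0) :
    ∃ rest, order = (-(c.getD i0 0), (i0 : Int)) :: rest := by
  cases order with
  | nil =>
    have := hp.length_eq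
    simp [length_pairsOf] at this
    omega
  | cons h rest =>
    refine ⟨rest, ?_⟩
    have hm : (-(c.getD i0 0), (i0 : Int)) ∈ pairsOf c := self_mem_pairsOf hi0
    have hhm : h ∈ pairsOf c := hp.subset (by simp)
    obtain ⟨j, hj, rfl⟩ := mem_pairsOf hhm
    by_cases hji : j = i0
    · subst hji; rfl
    · exfalso
      have hm' : (-(c.getD i0 0), (i0 : Int)) ∈ rest := by
        have := hp.mem_iff.mpr hm
        rcases List.mem_cons.mp this with heq | hmem
        · exact absurd (congrArg Prod.snd heq).symm (by simpa using fun h => hji (by exact_mod_cast h))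
        · exact hmem
      have hPL : PL (-(c.getD j 0), (j : Int)) (-(c.getD i0 0), (i0 : Int)) :=
        (List.pairwise_cons.mp hs).1 _ hm'
      simp only [PL, pairLt, Bool.or_eq_true, decide_eq_true_eq, Bool.and_eq_true, beq_iff_eq] at hPL
      have hle := hmax j hj
      rcases hPL with hlt | ⟨heq, hlt⟩
      · omega
      · have : j < i0 := by exact_mod_cast hlt
        have := hfirst j this
        omega

lemma rest_perm {c : List Int} {rest : List (Int × Int)} {i0 : Nat} (hi0 : i0 < c.length)
    (hp : ((-(c.getD i0 0), (i0 : Int)) :: rest).Perm (pairsOf c)) :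
    rest.Perm ((pairsOf c).eraseIdx i0) := by
  have h := (List.cons_perm_iff_perm_erase.mp hp).2
  have hidx : (pairsOf c).idxOf (-(c.getD i0 0), (i0 : Int)) = i0 := by
    have := (nodup_pairsOf c).idxOf_getElem i0 (by simpa [length_pairsOf] using hi0)
    rwa [getElem_pairsOf c i0 hi0] at this
  rwa [← List.eraseIdx_idxOf_eq_erase, hidx] at h

lemma upd_perm {c : List Int} {rest : List (Int × Int)} {i0 : Nat} (hi0 : i0 < c.length)
    (v : Int) (hr : rest.Perm ((pairsOf c).eraseIdx i0)) :
    (insortP (-v, (i0 : Int)) rest).Perm (pairsOf (c.set i0 v)) := by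
  refine (insortP_perm _ _).trans ?_
  rw [pairsOf_set c i0 v hi0]
  exact (hr.cons _).trans
    (List.set_perm_cons_eraseIdx (by simpa [length_pairsOf] using hi0) _).symm

lemma mem_eraseIdx_snd_ne {c : List Int} {i0 : Nat} (hi0 : i0 < c.length)
    {y : Int × Int} (hy : y ∈ (pairsOf c).eraseIdx i0) : y.2 ≠ (i0 : Int) := by
  have herase : (pairsOf c).eraseIdx i0 = (pairsOf c).erase (-(c.getD i0 0), (i0 : Int)) := by
    have hidx : (pairsOf c).idxOf (-(c.getD i0 0), (i0 : Int)) = i0 := by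
      have := (nodup_pairsOf c).idxOf_getElem i0 (by simpa [length_pairsOf] using hi0)
      rwa [getElem_pairsOf c i0 hi0] at this
    rw [← List.eraseIdx_idxOf_eq_erase, hidx]
  rw [herase] at hy
  have hne := (nodup_pairsOf c).mem_erase_iff.mp hy
  obtain ⟨j, hj, rfl⟩ := mem_pairsOf hne.2
  intro hsnd
  have hji : j = i0 := by simpa using hsnd
  subst hji
  exact hne.1 rfl

lemma upd_pairwise {c : List Int} {rest : List (Int × Int)} {i0 : Nat} (hi0 : i0 < c.length)
    (v : Int) (hs : rest.Pairwise PL) (hr : rest.Perm ((pairsOf c).eraseIdx i0)) :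
    (insortP (-v, (i0 : Int)) rest).Pairwise PL := by
  refine insortP_pairwise _ _ hs ?_
  intro y hy
  exact mem_eraseIdx_snd_ne hi0 (hr.subset hy)

lemma letterN_toNat {j : Nat} (h : j < 26) : (letterN j).toNat = 65 + j := by
  have hv : (65 + j).isValidChar := Or.inl (by omega)
  simp [letterN, Char.toNat_ofNat, hv]

lemma letterN_inj {i j : Nat} (hi : i < 26) (hj : j < 26) (h : letterN i = letterN j) : i = j := by
  have := congrArg Char.toNat h
  rw [letterN_toNat hi, letterN_toNat hj] at this
  omega

lemma length_itemsOf (c : List Int) : (itemsOf c).length = c.length := by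
  simp [itemsOf]

lemma keys_of_items {parties : PySem.Dict Char Int} {c : List Int}
    (hit : parties.items = itemsOf c) :
    parties.keys = (List.range c.length).map letterN := by
  simp only [PySem.Dict.keys, hit, itemsOf, List.map_map]
  rfl

lemma nodup_keys_of_items {parties : PySem.Dict Char Int} {c : List Int}
    (hit : parties.items = itemsOf c) (hlen : c.length ≤ 26) :
    parties.keys.Nodup := by
  rw [keys_of_items hit]
  refine List.Nodup.map_on ?_ List.nodup_range
  intro i hi j hj h
  exact letterN_inj (by simp at hi; omega) (by simp at hj; omega) h

lemma self_mem_itemsOf {c : List Int} {j : Nat} (hj : j < c.length) :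
    (letterN j, c.getD j 0) ∈ itemsOf c := by
  simp only [itemsOf, List.mem_map, List.mem_range]
  exact ⟨j, hj, rfl⟩

lemma getD_of_items {parties : PySem.Dict Char Int} {c : List Int}
    (hit : parties.items = itemsOf c) (hlen : c.length ≤ 26)
    {j : Nat} (hj : j < c.length) :
    parties.getD (letterN j) 0 = c.getD j 0 := by
  exact PySem.Dict.getD_of_mem_items _ (by rw [hit]; exact self_mem_itemsOf hj)
    (nodup_keys_of_items hit hlen) 0

lemma items_modify {parties : PySem.Dict Char Int} {c : List Int}
    (hit : parties.items = itemsOf c) (hlen : c.length ≤ 26)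
    {i0 : Nat} (hi0 : i0 < c.length) :
    (parties.modify (letterN i0) 0 (· - 1)).items
      = itemsOf (c.set i0 (c.getD i0 0 - 1)) := by
  have hcont : parties.contains (letterN i0) = true := by
    rw [PySem.Dict.contains_iff_mem_keys, keys_of_items hit]
    simp only [List.mem_map, List.mem_range]
    exact ⟨i0, hi0, rfl⟩
  show (parties.insert (letterN i0) (parties.getD (letterN i0) 0 - 1)).items = _
  rw [getD_of_items hit hlen hi0, PySem.Dict.items_insert_of_contains _ _ hcont, hit]
  apply List.ext_getElem
  · simp [itemsOf]
  · intro j hj hj'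
    simp only [itemsOf, List.length_map, List.length_range, List.length_set] at hj hj'
    simp only [itemsOf, List.getElem_map, List.getElem_range, List.length_set]
    by_cases hji : j = i0
    · subst hji
      simp [beq_iff_eq, List.getD, List.getElem?_set_self', List.getElem?_eq_getElem hi0]
    · have hne : (letterN j == letterN i0) = false := by
        simp only [beq_eq_false_iff_ne, ne_eq]
        intro h
        exact hji (letterN_inj (by omega) (by omega) h)
      simp [hne, List.getD, List.getElem?_set_ne (fun h => hji h.symm)]

lemma maxA_eq {parties : PySem.Dict Char Int} {c : List Int}
    (hit : parties.items = itemsOf c) (hlen : c.length ≤ 26)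
    {i0 : Nat} (hi0 : i0 < c.length)
    (hmax : ∀ j, j < c.length → c.getD j 0 ≤ c.getD i0 0)
    (hfirst : ∀ j, j < i0 → c.getD j 0 < c.getD i0 0) :
    PySem.List.max? parties.keys (fun k => parties.getD k 0) = some (letterN i0) := by
  rw [keys_of_items hit]
  have hkey : ∀ (j : Nat) (hj : j < c.length),
      parties.getD (((List.range c.length).map letterN)[j]'(by simpa using hj)) 0
        = c.getD j 0 := by
    intro j hj
    rw [List.getElem_map, List.getElem_range]
    exact getD_of_items hit hlen hj
  have := max?_eq_first (fun k => parties.getD k 0) ((List.range c.length).map letterN)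
    i0 (by simpa using hi0)
    (by intro j hj
        simp only [List.length_map, List.length_range] at hj
        dsimp only
        rw [hkey j hj, hkey i0 hi0]
        exact hmax j hj)
    (by intro j hj
        dsimp only
        rw [hkey j (hj.trans hi0), hkey i0 hi0]
        exact hfirst j hj)
  rwa [List.getElem_map, List.getElem_range] at this

lemma maxA2_eq {parties : PySem.Dict Char Int} {c : List Int}
    (hit : parties.items = itemsOf c) (hlen : c.length ≤ 26)
    {i0 : Nat} (hi0 : i0 < c.length)
    (hmax : ∀ j, j < c.length → c.getD j 0 ≤ c.getD i0 0)
    (hfirst : ∀ j, j < i0 → c.getD j 0 < c.getD i0 0) :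
    PySem.List.max? parties.items (fun x => x.2) = some (letterN i0, c.getD i0 0) := by
  rw [hit]
  have := max?_eq_first (fun x : Char × Int => x.2) (itemsOf c) i0
    (by simpa [length_itemsOf] using hi0)
    (by intro j hj
        simp only [length_itemsOf] at hj
        simp only [itemsOf, List.getElem_map, List.getElem_range]
        exact hmax j hj)
    (by intro j hj
        simp only [itemsOf, List.getElem_map, List.getElem_range]
        exact hfirst j hj)
  simpa only [itemsOf, List.getElem_map, List.getElem_range] using this



lemma loop_rel : ∀ (k : Nat) (c : List Int) (parties : PySem.Dict Char Int)
    (order : List (Int × Int)) (rem : Int) (plan : List String),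
    rem.toNat ≤ k → c.length ≤ 26 → parties.items = itemsOf c →
    order.Pairwise PL → order.Perm (pairsOf c) →
    ∃ c', c'.length = c.length ∧
      (evacLoopA parties rem plan).2 = (evacLoopB order rem plan).2 ∧
      (evacLoopA parties rem plan).1.items = itemsOf c' ∧
      (evacLoopB order rem plan).1.Pairwise PL ∧
      (evacLoopB order rem plan).1.Perm (pairsOf c') := by
  intro k
  induction k with
  | zero =>
    intro c parties order rem plan hk hlen hit hs hp
    have hng : ¬ rem > 2 := by omega
    rw [evacLoopA, evacLoopB.eq_def]
    simp only [dif_neg hng]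
    exact ⟨c, rfl, by trivial, hit, hs, hp⟩
  | succ k ih =>
    intro c parties order rem plan hk hlen hit hs hp
    by_cases hgt : rem > 2
    · by_cases hc : c = []
      · subst hc
        have horder : order = [] := by
          have := hp.length_eq
          simp [length_pairsOf] at this
          exact this
        subst horder
        have hkeys : parties.keys = [] := by
          rw [keys_of_items hit]; simp
        rw [evacLoopA, evacLoopB.eq_def]
        simp only [dif_pos hgt, hkeys]
        exact ⟨[], rfl, rfl, hit, List.Pairwise.nil, List.Perm.refl _⟩
      · obtain ⟨i0, hi0, hmax0, hfirst0⟩ := exists_first_max c hc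
        have hA1 := maxA_eq hit hlen hi0 hmax0 hfirst0
        obtain ⟨rest, horder⟩ := sorted_perm_head hs hp hi0 hmax0 hfirst0
        subst horder
        have hstail : rest.Pairwise PL := (List.pairwise_cons.mp hs).2
        have hrest : rest.Perm ((pairsOf c).eraseIdx i0) := rest_perm hi0 hp
        have hv : -(c.getD i0 0) + 1 = -(c.getD i0 0 - 1) := by ring
        have hlen1 : (c.set i0 (c.getD i0 0 - 1)).length = c.length := by simp
        have hit1 : (parties.modify (letterN i0) 0 (· - 1)).items
            = itemsOf (c.set i0 (c.getD i0 0 - 1)) := items_modify hit hlen hi0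
        have hs1 : (insortP (-(c.getD i0 0) + 1, (i0 : Int)) rest).Pairwise PL := by
          rw [hv]; exact upd_pairwise hi0 _ hstail hrest
        have hp1 : (insortP (-(c.getD i0 0) + 1, (i0 : Int)) rest).Perm
            (pairsOf (c.set i0 (c.getD i0 0 - 1))) := by
          rw [hv]; exact upd_perm hi0 _ hrest
        rw [evacLoopA, evacLoopB]
        simp only [dif_pos hgt, hA1]
        by_cases h2 : rem - 1 > 2
        · simp only [dif_pos h2]
          set c1 := c.set i0 (c.getD i0 0 - 1) with hc1
          have hc1ne : c1 ≠ [] := by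
            have hL : c1.length = c.length := by rw [hc1]; simp
            intro h
            rw [h] at hL
            simp at hL
            omega
          obtain ⟨i1, hi1, hmax1, hfirst1⟩ := exists_first_max c1 hc1ne
          have hlen' : c1.length ≤ 26 := by rw [hlen1]; exact hlen
          have hA2 := maxA2_eq hit1 hlen' hi1 hmax1 hfirst1
          obtain ⟨rest2, horder2⟩ := sorted_perm_head hs1 hp1 hi1 hmax1 hfirst1
          simp only [hA2, horder2]
          have hp1' := horder2 ▸ hp1
          have hs1' := horder2 ▸ hs1
          have hstail2 : rest2.Pairwise PL := (List.pairwise_cons.mp hs1').2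
          have hrest2 : rest2.Perm ((pairsOf c1).eraseIdx i1) := rest_perm hi1 hp1'
          have hv2 : -(c1.getD i1 0) + 1 = -(c1.getD i1 0 - 1) := by ring
          by_cases hcond : 2 * c1.getD i1 0 > rem - 1
          · rw [if_pos hcond, if_pos (show -2 * -(c1.getD i1 0) > rem - 1 by omega)]
            have hit2 : ((parties.modify (letterN i0) 0 (· - 1)).modify (letterN i1) 0 (· - 1)).items
                = itemsOf (c1.set i1 (c1.getD i1 0 - 1)) := items_modify hit1 hlen' hi1
            have hs2 : (insortP (-(c1.getD i1 0) + 1, (i1 : Int)) rest2).Pairwise PL := by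
              rw [hv2]; exact upd_pairwise hi1 _ hstail2 hrest2
            have hp2 : (insortP (-(c1.getD i1 0) + 1, (i1 : Int)) rest2).Perm
                (pairsOf (c1.set i1 (c1.getD i1 0 - 1))) := by
              rw [hv2]; exact upd_perm hi1 _ hrest2
            rw [chr65_natCast, chr65_natCast]
            obtain ⟨c', hl, heq, hi, hsB, hpB⟩ := ih (c1.set i1 (c1.getD i1 0 - 1)) _ _
              (rem - 2) (plan ++ [String.ofList [letterN i0, letterN i1]])
              (by omega) (by simpa using hlen') hit2 hs2 hp2
            exact ⟨c', by simpa [hlen1] using hl, heq, hi, hsB, hpB⟩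
          · rw [if_neg hcond, if_neg (show ¬ (-2 * -(c1.getD i1 0) > rem - 1) by omega)]
            rw [chr65_natCast]
            obtain ⟨c', hl, heq, hi, hsB, hpB⟩ := ih c1 _ _
              (rem - 1) (plan ++ [String.ofList [letterN i0]])
              (by omega) hlen' hit1 hs1' hp1'
            exact ⟨c', by simpa [hlen1] using hl, heq, hi, hsB, hpB⟩
        · simp only [dif_neg h2]
          rw [chr65_natCast]
          obtain ⟨c', hl, heq, hi, hsB, hpB⟩ := ih (c.set i0 (c.getD i0 0 - 1)) _ _
            (rem - 1) (plan ++ [String.ofList [letterN i0]])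
            (by omega) (by simpa using hlen) hit1 hs1 hp1
          exact ⟨c', by simpa [hlen1] using hl, heq, hi, hsB, hpB⟩
    · rw [evacLoopA, evacLoopB.eq_def]
      simp only [dif_neg hgt]
      exact ⟨c, rfl, by trivial, hit, hs, hp⟩


lemma ascii_eq : asciiUppercase = (List.range 26).map letterN := by decide

lemma joinNil : ∀ (ps : List (List Char)), PySem.Chars.join [] ps = ps.flatten := by
  intro ps
  induction ps with
  | nil => simp [PySem.Chars.join_nil]
  | cons p rest ih =>
    cases rest with
    | nil => simp [PySem.Chars.join_singleton]
    | cons q r =>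
      rw [PySem.Chars.join_cons_cons]
      simp only [List.flatten_cons]
      rw [ih]
      simp

lemma strJoinEmpty (l : List String) :
    PySem.Str.join "" l = String.ofList (l.map String.toList).flatten := by
  simp [PySem.Str.join, String.toList_empty, joinNil]

lemma flatten_flatMap' {α β : Type} (g : α → List (List β)) (l : List α) :
    (l.flatMap g).flatten = l.flatMap (fun x => (g x).flatten) := by
  simp only [List.flatMap_def, List.flatten_flatten, List.map_map]
  rfl

lemma tail_eq {parties' : PySem.Dict Char Int} {order' : List (Int × Int)} {c' : List Int}
    (hit : parties'.items = itemsOf c')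
    (hpB : order'.Perm (pairsOf c')) :
    PySem.Str.join "" (parties'.items.foldl
        (fun acc p => acc ++ PySem.List.pyRepeat [String.ofList [p.1]] p.2) []) =
    PySem.Str.join "" ((PySem.List.sorted order' (fun t => t.2)).foldl
        (fun acc p => acc ++ [String.ofList (PySem.List.pyRepeat [chr65 p.2] (-p.1))]) []) := by
  have hsorted : PySem.List.sorted order' (fun t => t.2) = pairsOf c' :=
    PySem.List.sorted_eq_of_perm_of_pairwise_lt _ _ _ hpB.symm (pairwise_snd_lt_pairsOf c')
  rw [hit, PySem.List.foldl_append_eq_flatMap, hsorted, PySem.List.foldl_append_singleton_eq_map]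
  rw [strJoinEmpty, strJoinEmpty]
  congr 1
  simp only [List.nil_append, List.map_flatMap, List.map_map]
  rw [flatten_flatMap']
  simp only [itemsOf, pairsOf, List.flatMap_map, List.map_map]
  rw [List.flatMap_def]
  congr 1
  apply List.map_congr_left
  intro j hj
  simp only [List.mem_range] at hj
  simp [PySem.List.pyRepeat_singleton, Function.comp, String.toList_ofList,
    chr65_natCast, List.map_replicate]



lemma letters_eq (senators : List Int) :
    PySem.List.slice asciiUppercase none (some (senators.length : Int))
      = (List.range (min senators.length 26)).map letterN := by
  rw [PySem.List.slice_to _ (by positivity), ascii_eq, ← List.map_take, List.take_range]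
  simp

lemma nodup_letters (n : Nat) (hn : n ≤ 26) : ((List.range n).map letterN).Nodup := by
  refine List.Nodup.map_on ?_ List.nodup_range
  intro i hi j hj h
  exact letterN_inj (by simp at hi; omega) (by simp at hj; omega) h

lemma getD_take {l : List Int} {n j : Nat} (hj : j < n) :
    (l.take n).getD j 0 = l.getD j 0 := by
  simp [List.getD, List.getElem?_take_of_lt hj]

lemma init_items (senators : List Int) :
    ((PySem.List.enumerate ((List.range (min senators.length 26)).map letterN) 0).foldl
      (fun d p => d.insert p.2 (PySem.List.pyGetD senators p.1 0)) PySem.Dict.empty).items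
    = itemsOf (senators.take (min senators.length 26)) := by
  rw [PySem.Dict.items_foldl_insert_fresh _ _ _ _
    (by intro a _; exact PySem.Dict.contains_empty _)
    (by rw [PySem.List.map_snd_enumerate]; exact nodup_letters _ (Nat.min_le_right _ _))]
  apply List.ext_getElem
  · simp [itemsOf, PySem.List.length_enumerate, List.length_take, PySem.Dict.empty,
      PySem.Dict.items]
  · intro j hj hj'
    simp only [PySem.Dict.items, PySem.Dict.empty, List.nil_append, List.getElem_map,
      PySem.List.getElem_enumerate, itemsOf] at *
    have hjn : j < min senators.length 26 := by
      simp [PySem.List.length_enumerate, PySem.Dict.empty, PySem.Dict.items] at hj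
      omega
    simp only [List.getElem_map, List.getElem_range]
    have h0j : (0 : Int) + (j : Int) = (j : Int) := by omega
    rw [h0j, PySem.List.pyGetD_natCast, getD_take hjn]


lemma init_order (senators : List Int) : ∀ (m : Nat),
    (((PySem.List.pyRange 0 (m : Int) 1).foldl
        (fun h i => insortP (-(PySem.List.pyGetD senators i 0), i) h) []).Pairwise PL ∧
     ((PySem.List.pyRange 0 (m : Int) 1).foldl
        (fun h i => insortP (-(PySem.List.pyGetD senators i 0), i) h) []).Perm
       ((List.range m).map (fun j => (-(senators.getD j 0), (j : Int))))) := by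
  intro m
  induction m with
  | zero =>
    rw [PySem.List.pyRange_one_eq_nil (by omega)]
    exact ⟨List.Pairwise.nil, by simp⟩
  | succ m ih =>
    have hcast : ((m + 1 : Nat) : Int) = (m : Int) + 1 := by push_cast; ring
    rw [hcast, PySem.List.pyRange_one_succ_right (by positivity), List.foldl_append]
    simp only [List.foldl_cons, List.foldl_nil]
    rw [PySem.List.pyGetD_natCast]
    obtain ⟨ihs, ihp⟩ := ih
    constructor
    · refine insortP_pairwise _ _ ihs ?_
      intro y hy
      obtain ⟨j, hjm, rfl⟩ : ∃ j, j < m ∧ y = (-(senators.getD j 0), (j : Int)) := by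
        have := ihp.subset hy
        simp only [List.mem_map, List.mem_range] at this
        obtain ⟨j, hj, rfl⟩ := this
        exact ⟨j, hj, rfl⟩
      simp only [ne_eq, Prod.snd]
      intro h
      have : j = m := by exact_mod_cast h
      omega
    · refine (insortP_perm _ _).trans ?_
      rw [List.range_succ, List.map_append]
      exact ((ihp.cons _).trans (List.perm_append_singleton _ _).symm)

lemma pairsOf_take (senators : List Int) (n : Nat) (hn : n ≤ senators.length) :
    (List.range n).map (fun j => (-(senators.getD j 0), (j : Int)))
      = pairsOf (senators.take n) := by
  have hlen : (senators.take n).length = n := by simp; omega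
  rw [pairsOf, hlen]
  apply List.map_congr_left
  intro j hj
  simp only [List.mem_range] at hj
  rw [getD_take hj]

theorem evac_eq (senators : List Int) : evacuate senators = evacuate_alt senators := by
  unfold evacuate evacuate_alt
  simp only []
  rw [letters_eq]
  rw [show min ((senators.length : Int)) 26 = ((min senators.length 26 : Nat) : Int) from by
    push_cast; rfl]
  obtain ⟨hs0, hp0⟩ := init_order senators (min senators.length 26)
  have hp0' := hp0.trans (by
    rw [pairsOf_take senators _ (Nat.min_le_left _ _)] :
      ((List.range (min senators.length 26)).map
        (fun j => (-(senators.getD j 0), (j : Int)))).Perm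
        (pairsOf (senators.take (min senators.length 26))))
  have hit0 := init_items senators
  obtain ⟨c', hl, heq, hi, hsB, hpB⟩ := loop_rel (senators.sum.toNat)
    (senators.take (min senators.length 26)) _ _ senators.sum []
    le_rfl (by simp) hit0 hs0 hp0'
  rw [heq, tail_eq hi hpB]

-- ===== VERDICT (by name: the statement is the Claim_ definition above) =====
theorem evacuate_spec : Claim_equal_evacuate := by
  intro senators _hdom
  show evacuate senators = evacuate_alt senators
  exact evac_eq senators
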